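-- pv_equiv track=rewrite | github.com/sajjadium/ctf-archives | ctfs/m0leCon/2025/Quals/crypto/Talor_2.0/talor_2.py | absorb
-- ===== SOURCE A (Python) =====
-- p = 59
--
-- SB = [58, 0, 7, 26, 4, 6, 38, 47, 39, 20, 55, 32, 16, 13, 29, 11, 24, 15, 49, 14, 34, 56, 27, 12, 17, 48, 52, 35, 3, 21, 36, 54, 22, 5, 9, 40, 45, 30, 1, 23, 43, 8, 42, 33, 46, 28, 44, 41, 25, 2, 37, 18, 10, 19, 51, 53, 31, 50, 57]
--
-- ROUNDS = 360
--
-- rc = [0 for i in range(ROUNDS)]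
--
-- def absorb(state):
--     state = state[:]
--     for i in range(ROUNDS):
--         tmp = SB[(state[0] + rc[i]) % p]
--         for j in range(1, len(state)):
--             state[j] += tmp
--             state[j] %= p
--         state = state[1:] + state[:1]
--     return state
-- ===== SOURCE B (Python) =====
-- p = 59
--
-- SB = [58, 0, 7, 26, 4, 6, 38, 47, 39, 20, 55, 32, 16, 13, 29, 11, 24, 15, 49, 14, 34, 56, 27, 12, 17, 48, 52, 35, 3, 21, 36, 54, 22, 5, 9, 40, 45, 30, 1, 23, 43, 8, 42, 33, 46, 28, 44, 41, 25, 2, 37, 18, 10, 19, 51, 53, 31, 50, 57]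
--
-- ROUNDS = 360
--
-- def absorb(state):
--     # Lazy global offset: each round adds tmp to every element except the head,
--     # tracked as off += tmp together with buf[head] -= tmp; O(ROUNDS + n).
--     n = len(state)
--     buf = state[:]
--     off = 0
--     for i in range(ROUNDS):
--         h = i % n
--         tmp = SB[(buf[h] + off) % p]
--         off += tmp
--         buf[h] -= tmp
--     r = ROUNDS % n
--     return [(buf[(r + k) % n] + off) % p for k in range(n)]
-- ===== Notes on version B (the rewrite author's own statement) =====
-- stated objective: faster
-- what changed: B replaces the 360 per-round O(n) add-and-rotate passes by a lazy global offset plus a rotation pointer (off += tmp, buf[head] -= tmp), applying the offset and the final rotation once at the end.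
-- intended difference: On singleton states whose value is not already in [0,59), A returns the raw value unchanged (its inner loop never runs, so the value is never reduced), while B returns the value mod 59, the reduced sponge state every other input gets - the intended value. — e.g. on absorb([100]): A returns [100], B returns [41]
import Mathlib
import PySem

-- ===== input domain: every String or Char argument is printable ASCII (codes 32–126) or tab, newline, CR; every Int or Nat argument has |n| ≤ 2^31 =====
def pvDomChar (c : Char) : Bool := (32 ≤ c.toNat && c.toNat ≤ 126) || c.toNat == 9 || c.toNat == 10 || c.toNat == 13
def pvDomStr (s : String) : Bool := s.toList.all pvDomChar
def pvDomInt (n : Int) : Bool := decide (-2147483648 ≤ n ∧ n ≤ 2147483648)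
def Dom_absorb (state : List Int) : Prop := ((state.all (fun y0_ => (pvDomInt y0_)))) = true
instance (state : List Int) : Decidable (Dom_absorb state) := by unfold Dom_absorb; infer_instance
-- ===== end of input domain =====

-- B replaces the per-round O(n) pass by a lazy global offset plus a rotation pointer (O(ROUNDS+n));
-- proved equal to A outside D_absorb (singleton states with an unreduced value, where B returns the value mod p).

-- module constants shared by both Pythons
def pvSB : List Int := [58, 0, 7, 26, 4, 6, 38, 47, 39, 20, 55, 32, 16, 13, 29, 11, 24, 15, 49, 14, 34, 56, 27, 12, 17, 48, 52, 35, 3, 21, 36, 54, 22, 5, 9, 40, 45, 30, 1, 23, 43, 8, 42, 33, 46, 28, 44, 41, 25, 2, 37, 18, 10, 19, 51, 53, 31, 50, 57]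
def pvRC : List Int := List.replicate 360 0

-- ===== PORT A =====
-- one round: tmp = SB[(state[0] + rc[i]) % p]; for j in 1..len-1: state[j] = (state[j]+tmp) % p; rotate left
def absorbRound (i : Int) (st : List Int) : List Int :=
  let tmp := PySem.List.pyGetD pvSB (PySem.Int.mod (PySem.List.pyGetD st 0 0 + PySem.List.pyGetD pvRC i 0) 59) 0
  let st2 := (PySem.List.pyRange 1 (st.length : Int) 1).foldl
      (fun s j => PySem.List.pySetD s j (PySem.Int.mod (PySem.List.pyGetD s j 0 + tmp) 59)) st
  PySem.List.slice st2 (some 1) none ++ PySem.List.slice st2 none (some 1)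

def absorb (state : List Int) : List Int :=
  (PySem.List.pyRange 0 360 1).foldl (fun st i => absorbRound i st) state

-- ===== PORT B =====
-- one round of Source B: h = i % n; tmp = SB[(buf[h] + off) % p]; off += tmp; buf[h] -= tmp
def absorbStep (n : Int) (bo : List Int × Int) (i : Int) : List Int × Int :=
  let h := PySem.Int.mod i n
  let tmp := PySem.List.pyGetD pvSB (PySem.Int.mod (PySem.List.pyGetD bo.1 h 0 + bo.2) 59) 0
  (PySem.List.pySetD bo.1 h (PySem.List.pyGetD bo.1 h 0 - tmp), bo.2 + tmp)

def absorb_alt (state : List Int) : List Int :=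
  let n : Int := (state.length : Int)
  let bo := (PySem.List.pyRange 0 360 1).foldl (absorbStep n) (state, 0)
  let r := PySem.Int.mod 360 n
  (PySem.List.pyRange 0 n 1).map
    (fun k => PySem.Int.mod (PySem.List.pyGetD bo.1 (PySem.Int.mod (r + k) n) 0 + bo.2) 59)

-- ===== PRECONDITION & SPEC =====
-- Pre_ excludes only the empty list, on which A raises IndexError (state[0]).
def Pre_absorb (state : List Int) : Prop := state ≠ []
instance (state : List Int) : Decidable (Pre_absorb state) := by unfold Pre_absorb; infer_instance
def pvWitness_absorb : List Int := [1, 2, 3]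

-- On singleton states whose value is not already reduced mod p = 59, A returns the raw value unchanged
-- (its inner loop never runs), while B returns the value mod p, the reduced sponge state every other
-- input gets — B's is the intended value.
def D_absorb (state : List Int) : Prop :=
  state.length = 1 ∧ ¬(0 ≤ state.getD 0 0 ∧ state.getD 0 0 < 59)
instance (state : List Int) : Decidable (D_absorb state) := by unfold D_absorb; infer_instance

def Spec_absorb (state : List Int) (out : List Int) : Prop := ¬ D_absorb state → out = absorb_alt state
instance (state : List Int) (out : List Int) : Decidable (Spec_absorb state out) := by unfold Spec_absorb; infer_instance

def pvDiffWitness_absorb : List Int := [100]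
def pvDiffWitnessOut_absorb : (List Int) × (List Int) := ([100], [41])

-- ===== CLAIM (what is proved, stated in full; the proofs are below) =====
def Claim_unchanged_absorb : Prop := ∀ (state : List Int), Dom_absorb state → Pre_absorb state → Spec_absorb state (absorb state)
def Claim_changed_absorb : Prop := Dom_absorb (pvDiffWitness_absorb) ∧ Pre_absorb (pvDiffWitness_absorb) ∧ D_absorb (pvDiffWitness_absorb) ∧ absorb (pvDiffWitness_absorb) = pvDiffWitnessOut_absorb.1 ∧ absorb_alt (pvDiffWitness_absorb) = pvDiffWitnessOut_absorb.2 ∧ pvDiffWitnessOut_absorb.1 ≠ pvDiffWitnessOut_absorb.2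
def Claim_exact_absorb : Prop := ∀ (state : List Int), Dom_absorb state → Pre_absorb state → D_absorb state → absorb state ≠ absorb_alt state

-- ===== LEMMAS AND PROOFS =====

-- rc is all zeros
lemma pvRC_getD (i : Int) : PySem.List.pyGetD pvRC i 0 = 0 := by
  by_cases h : PySem.Raise.InRange 360 i
  · exact List.eq_of_mem_replicate (PySem.List.pyGetD_mem (xs := pvRC) (i := i) (d := 0)
      (by rw [pvRC, List.length_replicate]; exact h))
  · exact PySem.List.pyGetD_of_none _ _ _
      (by rw [PySem.List.pyGet?_eq_none_iff, pvRC, List.length_replicate]; exact h)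

-- the inner index loop of A is a map over the tail
lemma pvInnerFold (tmp : Int) : ∀ (t pre : List Int),
    (PySem.List.pyRange (pre.length : Int) ((pre.length : Int) + (t.length : Int)) 1).foldl
      (fun s j => PySem.List.pySetD s j (PySem.Int.mod (PySem.List.pyGetD s j 0 + tmp) 59)) (pre ++ t)
    = pre ++ t.map (fun y => PySem.Int.mod (y + tmp) 59) := by
  intro t
  induction t with
  | nil => intro pre; rw [PySem.List.pyRange_one_eq_nil (by simp)]; simp
  | cons y t' ih =>
    intro pre
    rw [PySem.List.pyRange_one_cons (by simp only [List.length_cons]; push_cast; omega)]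
    simp only [List.foldl_cons]
    have hget : PySem.List.pyGetD (pre ++ y :: t') ((pre.length : Nat) : Int) 0 = y := by
      rw [PySem.List.pyGetD_natCast, List.getD_append_right _ _ _ _ (Nat.le_refl _)]
      simp
    have hset : PySem.List.pySetD (pre ++ y :: t') ((pre.length : Nat) : Int)
        (PySem.Int.mod (y + tmp) 59) = pre ++ PySem.Int.mod (y + tmp) 59 :: t' := by
      rw [PySem.List.pySetD_natCast, List.set_append]
      simp
    rw [hget, hset]
    have h := ih (pre ++ [PySem.Int.mod (y + tmp) 59])
    simp only [List.length_append, List.length_cons, List.length_nil, Nat.cast_add,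
      Nat.cast_one, zero_add, List.append_assoc, List.singleton_append,
      List.map_cons] at h ⊢
    rw [show ((pre.length : Int) + ((t'.length : Int) + 1)) = (pre.length : Int) + 1 + (t'.length : Int) by ring]
    exact h

-- characterisation of one round of A
lemma pvRound_char (i : Int) (h : Int) (t : List Int) :
    absorbRound i (h :: t)
    = t.map (fun y => PySem.Int.mod (y + PySem.List.pyGetD pvSB (PySem.Int.mod h 59) 0) 59) ++ [h] := by
  unfold absorbRound
  simp only [pvRC_getD, add_zero, PySem.List.pyGetD_zero_cons]
  have hrange : PySem.List.pyRange 1 (((h :: t).length : Nat) : Int) 1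
      = PySem.List.pyRange (([h] : List Int).length : Int) ((([h] : List Int).length : Int) + (t.length : Int)) 1 := by
    simp [add_comm]
  rw [hrange]
  rw [show (h :: t) = [h] ++ t from rfl, pvInnerFold]
  rw [PySem.List.slice_from_one, PySem.List.slice_to _ (by norm_num : (0:Int) ≤ 1)]
  simp

-- which original indices already hold a reduced (mod p) value after i rounds
def pvRed (n i k : Nat) : Bool := (decide (1 ≤ i) && decide (k ≠ 0)) || (decide (2 ≤ i) && decide (2 ≤ n))

def pvVal (n : Nat) (buf : List Int) (off : Int) (i k : Nat) : Int :=
  if pvRed n i k then PySem.Int.mod (buf.getD k 0 + off) 59 else buf.getD k 0 + off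

-- the simulation invariant: after i rounds A's state lists, position m, the value of original index (i+m) % n
def pvInv (n i : Nat) (s buf : List Int) (off : Int) : Prop :=
  s.length = n ∧ buf.length = n ∧
    ∀ m, m < n → s.getD m 0 = pvVal n buf off i ((i + m) % n)

lemma pvRed_head (n N : Nat) (hn : 1 ≤ n) : pvRed n (N + 1) (N % n) = pvRed n N (N % n) := by
  unfold pvRed
  rcases N with _ | _ | N
  · simp
  · rcases Nat.lt_or_ge 1 n with h | h
    · rw [Nat.mod_eq_of_lt h]; simp
    · have : n = 1 := by omega
      subst this; simp
  · have h1 : 1 ≤ N + 2 := by omega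
    have h2 : 2 ≤ N + 2 := by omega
    have h3 : 1 ≤ N + 3 := by omega
    have h4 : 2 ≤ N + 3 := by omega
    simp [h1, h2, h3, h4]

lemma pvRed_succ_true (n N k : Nat) (hn : 1 ≤ n) (hne : k ≠ N % n) : pvRed n (N + 1) k = true := by
  unfold pvRed
  rcases eq_or_ne k 0 with rfl | h
  · have hn2 : 2 ≤ n := by
      by_contra hlt
      have : n = 1 := by omega
      subst this
      exact hne (N.mod_one).symm
    have hN : 1 ≤ N := by
      by_contra hN0
      have : N = 0 := by omega
      subst this
      exact hne (Nat.zero_mod n).symm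
    have h2 : 2 ≤ N + 1 := by omega
    simp [hn2, h2]
  · simp [h]

lemma pvInv_step (n N : Nat) (hn : 1 ≤ n) (s buf : List Int) (off : Int)
    (h : pvInv n N s buf off) :
    pvInv n (N + 1) (absorbRound (N : Int) s)
      ((absorbStep (n : Int) (buf, off) (N : Int)).1)
      ((absorbStep (n : Int) (buf, off) (N : Int)).2) := by
  obtain ⟨hs, hb, hv⟩ := h
  obtain ⟨h0, t, rfl⟩ : ∃ h0 t, s = h0 :: t := by
    cases s with
    | nil => exact absurd hs (by simp; omega)
    | cons a t => exact ⟨a, t, rfl⟩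
  have hlen : t.length + 1 = n := by simpa using hs
  have hm59 : ∀ a : Int, PySem.Int.mod a 59 = a % 59 :=
    fun a => PySem.Int.mod_eq_emod_of_pos (by norm_num)
  set k0 := N % n with hk0def
  have hk0 : k0 < n := Nat.mod_lt _ (by omega)
  have hv0 := hv 0 (by omega)
  rw [Nat.add_zero, List.getD_cons_zero] at hv0
  set v0 : Int := buf.getD k0 0 + off with hv0def
  have hmod : PySem.Int.mod h0 59 = PySem.Int.mod v0 59 := by
    rw [hv0]
    unfold pvVal
    split
    · simp only [hm59]
      exact Int.emod_emod_of_dvd _ dvd_rfl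
    · rfl
  set tmp : Int := PySem.List.pyGetD pvSB (PySem.Int.mod v0 59) 0 with htmp
  have hstep : absorbStep (n : Int) (buf, off) (N : Int)
      = (buf.set k0 (buf.getD k0 0 - tmp), off + tmp) := by
    unfold absorbStep
    simp only [PySem.Int.mod_natCast, PySem.List.pyGetD_natCast, PySem.List.pySetD_natCast]
    rfl
  rw [hstep]
  rw [pvRound_char, hmod]
  refine ⟨by simp [hlen], by simp [hb], ?_⟩
  intro m hm
  dsimp only
  rcases Nat.lt_or_ge m t.length with hmlt | hmge
  · -- positions coming from the tail: reduced, original index ≠ k0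
    set k := (N + 1 + m) % n with hkdef
    have hk : k < n := Nat.mod_lt _ (by omega)
    have hne : k ≠ k0 := by
      intro he
      have hmeq : (N + (m + 1)) % n = N % n := by
        rw [show N + (m + 1) = N + 1 + m by ring]; exact he
      have hdvd : n ∣ (N + (m + 1)) - N := (Nat.modEq_iff_dvd' (Nat.le_add_right _ _)).mp hmeq.symm
      rw [Nat.add_sub_cancel_left] at hdvd
      have := Nat.le_of_dvd (by omega) hdvd
      omega
    have hL : (List.map (fun y => PySem.Int.mod (y + tmp) 59) t ++ [h0]).getD m 0
        = PySem.Int.mod (t.getD m 0 + tmp) 59 := by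
      rw [List.getD_append _ _ _ m (by simpa using hmlt)]
      rw [List.getD_eq_getElem _ _ (by simpa using hmlt), List.getElem_map,
        List.getD_eq_getElem _ _ hmlt]
    rw [hL]
    have hvm := hv (m + 1) (by omega)
    rw [List.getD_cons_succ] at hvm
    rw [show N + (m + 1) = N + 1 + m by ring, ← hkdef] at hvm
    have hbuf : (buf.set k0 (buf.getD k0 0 - tmp)).getD k 0 = buf.getD k 0 := by
      rw [List.getD_eq_getElem?_getD, List.getElem?_set_ne (fun hh => hne hh.symm),
        ← List.getD_eq_getElem?_getD]
    unfold pvVal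
    rw [hbuf, pvRed_succ_true n N k (by omega) (hkdef ▸ hne), if_pos rfl]
    rw [hvm]
    unfold pvVal
    split <;> (simp only [hm59]; omega)
  · -- the rotated head: value carried over unchanged, original index k0
    have hmeq : m = t.length := by omega
    subst hmeq
    have hidx : (N + 1 + t.length) % n = k0 := by
      rw [show N + 1 + t.length = N + n by omega]
      exact Nat.add_mod_right N n
    have hL : (List.map (fun y => PySem.Int.mod (y + tmp) 59) t ++ [h0]).getD t.length 0 = h0 := by
      rw [List.getD_append_right _ _ _ _ (by simp)]
      simp
    rw [hL, hidx]
    have hbuf : (buf.set k0 (buf.getD k0 0 - tmp)).getD k0 0 = buf.getD k0 0 - tmp := by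
      rw [List.getD_eq_getElem _ _ (by simp [hb]; omega), List.getElem_set_self]
    unfold pvVal
    rw [hbuf, pvRed_head n N (by omega)]
    rw [show buf.getD k0 0 - tmp + (off + tmp) = v0 by rw [hv0def]; ring]
    rw [hv0]
    unfold pvVal
    rfl


lemma pvInv_iter (x : List Int) (hx : 1 ≤ x.length) (N : Nat) :
    pvInv x.length N ((PySem.List.pyRange 0 (N : Int) 1).foldl (fun st i => absorbRound i st) x)
      (((PySem.List.pyRange 0 (N : Int) 1).foldl (absorbStep (x.length : Int)) (x, 0)).1)
      (((PySem.List.pyRange 0 (N : Int) 1).foldl (absorbStep (x.length : Int)) (x, 0)).2) := by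
  induction N with
  | zero =>
    simp only [Nat.cast_zero]
    rw [PySem.List.pyRange_one_eq_nil le_rfl]
    simp only [List.foldl_nil]
    refine ⟨rfl, rfl, ?_⟩
    intro m hm
    unfold pvVal pvRed
    simp only [Nat.zero_add, Nat.mod_eq_of_lt hm]
    simp
  | succ N ih =>
    have hc : (((N + 1 : Nat)) : Int) = (N : Int) + 1 := by push_cast; ring
    rw [hc, PySem.List.pyRange_one_succ_right (by exact_mod_cast Nat.zero_le N),
      List.foldl_append, List.foldl_append]
    simp only [List.foldl_cons, List.foldl_nil]
    exact pvInv_step x.length N hx _ _ _ ih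

lemma pvA_iter_singleton (x : Int) (N : Nat) :
    (PySem.List.pyRange 0 (N : Int) 1).foldl (fun st i => absorbRound i st) [x] = [x] := by
  induction N with
  | zero =>
    simp only [Nat.cast_zero]
    rw [PySem.List.pyRange_one_eq_nil le_rfl]
    rfl
  | succ N ih =>
    have hc : (((N + 1 : Nat)) : Int) = (N : Int) + 1 := by push_cast; ring
    rw [hc, PySem.List.pyRange_one_succ_right (by exact_mod_cast Nat.zero_le N), List.foldl_append]
    simp only [List.foldl_cons, List.foldl_nil, ih]
    rw [pvRound_char]
    simp

lemma pvA_singleton (x : Int) : absorb [x] = [x] := by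
  have h := pvA_iter_singleton x 360
  rw [show ((360 : Nat) : Int) = (360 : Int) from rfl] at h
  exact h

lemma pvB_singleton (x : Int) : absorb_alt [x] = [PySem.Int.mod x 59] := by
  have hinv := pvInv_iter [x] (by simp) 360
  rw [show ((360 : Nat) : Int) = (360 : Int) from rfl] at hinv
  have hsx := pvA_iter_singleton x 360
  rw [show ((360 : Nat) : Int) = (360 : Int) from rfl] at hsx
  obtain ⟨hs, hb, hv⟩ := hinv
  have hv0 := hv 0 (by simp)
  rw [hsx] at hv0
  simp only [List.getD_cons_zero, List.length_cons, List.length_nil, Nat.zero_add,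
    Nat.add_zero, Nat.mod_one, Nat.cast_one] at hv0
  unfold pvVal pvRed at hv0
  rw [if_neg (by decide)] at hv0
  unfold absorb_alt
  simp only [List.length_cons, List.length_nil, Nat.zero_add, Nat.cast_one]
  have hr : PySem.List.pyRange 0 (1 : Int) 1 = [0] := by decide
  have hz : PySem.Int.mod (PySem.Int.mod 360 (1 : Int) + 0) (1 : Int) = 0 := by decide
  rw [hr]
  simp only [List.map_cons, List.map_nil]
  rw [hz, PySem.List.pyGetD_zero]
  conv_rhs => rw [hv0]

lemma pvMain (state : List Int) (h2 : 2 ≤ state.length) : absorb state = absorb_alt state := by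
  have hinv := pvInv_iter state (by omega) 360
  rw [show ((360 : Nat) : Int) = (360 : Int) from rfl] at hinv
  obtain ⟨hs, hb, hv⟩ := hinv
  unfold absorb absorb_alt
  apply List.ext_getElem
  · simp only [List.length_map, PySem.List.length_pyRange_one, hs]
    omega
  · intro m hma hmb
    have hm : m < state.length := by rwa [hs] at hma
    have hmr : m < (PySem.List.pyRange 0 (state.length : Int) 1).length := by
      simpa [PySem.List.length_pyRange_one] using hm
    rw [List.getElem_map, PySem.List.getElem_pyRange_one _ _ _ hmr]
    rw [← List.getD_eq_getElem _ 0 hma, hv m hm]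
    have hred : pvRed state.length 360 ((360 + m) % state.length) = true := by
      unfold pvRed
      have : 2 ≤ (360 : Nat) := by omega
      simp [this, h2]
    unfold pvVal
    rw [hred, if_pos rfl]
    rw [show (360 : Int) = ((360 : Nat) : Int) from rfl, PySem.Int.mod_natCast,
      zero_add, show ((360 % state.length : Nat) : Int) + (m : Int) = ((360 % state.length + m : Nat) : Int) by push_cast; ring,
      PySem.Int.mod_natCast, Nat.mod_add_mod, PySem.List.pyGetD_natCast]

-- ===== VERDICT (by name: the statement is the Claim_ definition above) =====
theorem absorb_spec : Claim_unchanged_absorb := by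
  intro state _ hpre hnd
  rcases Nat.lt_or_ge state.length 2 with hlt | hge
  · have h1 : state.length = 1 := by
      have : state.length ≠ 0 := fun h => hpre (List.eq_nil_of_length_eq_zero h)
      omega
    obtain ⟨x, rfl⟩ : ∃ x, state = [x] := by
      cases state with
      | nil => simp at h1
      | cons a t => cases t with
        | nil => exact ⟨a, rfl⟩
        | cons b t' => simp at h1
    have hx : 0 ≤ x ∧ x < 59 := by
      by_contra hc
      exact hnd ⟨by simp, by simpa using hc⟩
    rw [pvA_singleton, pvB_singleton,
      PySem.Int.mod_eq_emod_of_pos (by norm_num), Int.emod_eq_of_lt hx.1 hx.2]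
  · exact pvMain state hge

theorem absorb_changed : Claim_changed_absorb := by
  unfold Claim_changed_absorb
  refine ⟨by decide, by decide, by decide, ?_, ?_, by decide⟩
  · rw [show pvDiffWitness_absorb = [100] from rfl, pvA_singleton]; rfl
  · rw [show pvDiffWitness_absorb = [100] from rfl, pvB_singleton]; decide

theorem absorb_tight : Claim_exact_absorb := by
  intro state _ _ hd
  obtain ⟨x, rfl⟩ : ∃ x, state = [x] := by
    cases state with
    | nil => simp [D_absorb] at hd
    | cons a t => cases t with
      | nil => exact ⟨a, rfl⟩
      | cons b t' => simp [D_absorb] at hd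
  have hx : ¬(0 ≤ x ∧ x < 59) := by simpa [D_absorb] using hd.2
  rw [pvA_singleton, pvB_singleton]
  intro h
  have hm : PySem.Int.mod x 59 = x := by
    have := List.cons.injEq x ([] : List Int) (PySem.Int.mod x 59) [] ▸ h
    simpa using h.symm
  have h0 := PySem.Int.mod_nonneg x (b := 59) (by norm_num)
  have h1 := PySem.Int.mod_lt x (b := 59) (by norm_num)
  rw [hm] at h0 h1
  exact hx ⟨h0, h1⟩
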